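-- pv_equiv track=rewrite | github.com/Chenwei-1999/Sparse_Video_Understanding | examples/revise/pnp_utils.py | unseen_intervals
-- ===== SOURCE A (Python) =====
-- def unseen_intervals(frame_count: int, seen_frames: list[int]) -> list[tuple[int, int]]:
--     """Return unseen frame ranges as inclusive [start, end] intervals."""
--     if frame_count <= 0:
--         return []
--     seen = sorted({int(i) for i in (seen_frames or []) if 0 <= int(i) < frame_count})
--     anchors = [-1, *seen, frame_count]
--     intervals: list[tuple[int, int]] = []
--     for a, b in zip(anchors, anchors[1:], strict=False):
--         s = a + 1
--         e = b - 1
--         if s <= e: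
--             intervals.append((s, e))
--     return intervals
-- ===== SOURCE B (Python) =====
-- def unseen_intervals(frame_count: int, seen_frames: list[int]) -> list[tuple[int, int]]:
--     """Return unseen frame ranges as inclusive [start, end] intervals."""
--     if frame_count <= 0:
--         return []
--     hi = frame_count  # exclusive upper anchor of the current gap
--     out = []
--     for v in sorted((int(i) for i in seen_frames if 0 <= int(i) < frame_count), reverse=True):
--         if v < hi:  # skip duplicates (v == hi after processing v once)
--             if v + 1 <= hi - 1:
--                 out.append((v + 1, hi - 1))
--             hi = v
--     if 0 <= hi - 1:
--         out.append((0, hi - 1))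
--     out.reverse()
--     return out
-- ===== Notes on version B (the rewrite author's own statement) =====
-- stated objective: alternative
-- what changed: Instead of deduplicating into a set, sorting ascending, building an anchors list and zipping it with its tail, B reverse-sorts the valid frames (duplicates kept) and emits the gaps in one descending scan that tracks a single upper anchor and skips duplicates inline, building the result back-to-front with one final reversal.
import Mathlib
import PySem

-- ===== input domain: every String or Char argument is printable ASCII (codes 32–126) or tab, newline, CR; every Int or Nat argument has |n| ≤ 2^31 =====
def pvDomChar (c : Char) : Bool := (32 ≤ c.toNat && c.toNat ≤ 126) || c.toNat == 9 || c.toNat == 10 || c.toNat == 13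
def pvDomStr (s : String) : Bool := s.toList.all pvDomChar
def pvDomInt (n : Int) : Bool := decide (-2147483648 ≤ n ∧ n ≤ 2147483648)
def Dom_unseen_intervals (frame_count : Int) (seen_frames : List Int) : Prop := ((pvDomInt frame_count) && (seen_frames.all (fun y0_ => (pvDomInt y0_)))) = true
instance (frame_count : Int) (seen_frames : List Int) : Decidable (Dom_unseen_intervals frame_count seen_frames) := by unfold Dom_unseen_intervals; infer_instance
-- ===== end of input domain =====

-- B builds the intervals in a single descending scan over the reverse-sorted valid frames
-- (no set, no anchors list, no zip), prepend-style with one final reversal; objective: simpler/alternative.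

-- ===== PORT A =====
-- 'int(i)' is the identity on Int; 'seen_frames or []' is the identity on lists here.
def unseen_intervals (frame_count : Int) (seen_frames : List Int) : List (Int × Int) :=
  if frame_count ≤ 0 then []
  else
    let seen := PySem.List.sorted
      (PySem.Set.ofList (seen_frames.filter (fun i => decide (0 ≤ i) && decide (i < frame_count))))
      (fun x => x) false
    let anchors := -1 :: (seen ++ [frame_count])
    let intervals : List (Int × Int) :=
      (List.zip anchors (PySem.List.slice anchors (some 1) none)).foldl
        (fun acc ab =>
          let s := ab.1 + 1
          let e := ab.2 - 1
          if s ≤ e then acc ++ [(s, e)] else acc) []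
    intervals

-- ===== PORT B =====
def unseen_intervals_alt (frame_count : Int) (seen_frames : List Int) : List (Int × Int) :=
  if frame_count ≤ 0 then []
  else
    let r :=
      (PySem.List.sorted
        (seen_frames.filter (fun i => decide (0 ≤ i) && decide (i < frame_count)))
        (fun x => x) true).foldl
        (fun st v =>
          if v < st.1 then
            (v, if v + 1 ≤ st.1 - 1 then st.2 ++ [(v + 1, st.1 - 1)] else st.2)
          else st)
        (frame_count, ([] : List (Int × Int)))
    let out := if 0 ≤ r.1 - 1 then r.2 ++ [(0, r.1 - 1)] else r.2
    out.reverse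

-- ===== PRECONDITION & SPEC =====
def Spec_unseen_intervals (frame_count : Int) (seen_frames : List Int) (out : List (Int × Int)) : Prop := out = unseen_intervals_alt frame_count seen_frames
instance (frame_count : Int) (seen_frames : List Int) (out : List (Int × Int)) : Decidable (Spec_unseen_intervals frame_count seen_frames out) := by unfold Spec_unseen_intervals; infer_instance

-- ===== CLAIM (what is proved, stated in full; the proofs are below) =====
def Claim_equal_unseen_intervals : Prop := ∀ (frame_count : Int) (seen_frames : List Int), Dom_unseen_intervals frame_count seen_frames → Spec_unseen_intervals frame_count seen_frames (unseen_intervals frame_count seen_frames)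

-- ===== LEMMAS AND PROOFS =====

/-- one candidate gap between consecutive anchors -/
def gapOne (a b : Int) : List (Int × Int) :=
  if a + 1 ≤ b - 1 then [(a + 1, b - 1)] else []

/-- A's gaps of an ascending anchor chain starting after anchor `a`. -/
def gapsA (a : Int) : List Int → List (Int × Int)
  | [] => []
  | b :: r => gapOne a b ++ gapsA b r

/-- B's descending gap list: scanning values downward from upper anchor `hi`. -/
def gapsD (hi : Int) : List Int → List (Int × Int)
  | [] => if 0 ≤ hi - 1 then [(0, hi - 1)] else []
  | v :: r => if v < hi then gapOne v hi ++ gapsD v r else gapsD hi r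

/-- A's zip-fold over consecutive anchors is `gapsA`. -/
lemma zipfold_eq_gapsA (rest : List Int) : ∀ (a : Int) (acc : List (Int × Int)),
    (List.zip (a :: rest) rest).foldl
      (fun acc ab =>
        let s := ab.1 + 1
        let e := ab.2 - 1
        if s ≤ e then acc ++ [(s, e)] else acc) acc
    = acc ++ gapsA a rest := by
  induction rest with
  | nil => intro a acc; simp [gapsA]
  | cons b r ih =>
    intro a acc
    simp only [List.zip_cons_cons, List.foldl_cons, gapsA, gapOne]
    rw [ih b]
    split_ifs with h <;> simp

/-- B's fold plus the final closing step is `gapsD`. -/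
lemma bfold_eq_gapsD (t : List Int) : ∀ (hi : Int) (acc : List (Int × Int)),
    (let r := t.foldl
        (fun st v =>
          if v < st.1 then
            (v, if v + 1 ≤ st.1 - 1 then st.2 ++ [(v + 1, st.1 - 1)] else st.2)
          else st)
        (hi, acc)
     if 0 ≤ r.1 - 1 then r.2 ++ [(0, r.1 - 1)] else r.2)
    = acc ++ gapsD hi t := by
  induction t with
  | nil => intro hi acc; simp only [List.foldl_nil, gapsD]; split_ifs <;> simp
  | cons v r ih =>
    intro hi acc
    simp only [List.foldl_cons, gapsD]
    by_cases hv : v < hi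
    · simp only [if_pos hv]
      rw [ih v]
      unfold gapOne
      split_ifs with h <;> simp
    · simp only [if_neg hv]
      rw [ih hi]

/-- a candidate gap list is its own reverse (length ≤ 1). -/
lemma gapOne_reverse (a b : Int) : (gapOne a b).reverse = gapOne a b := by
  unfold gapOne; split_ifs <;> simp

/-- last element of `l ++ [x]` with default. -/
lemma getLastD_append_singleton (l : List Int) (x d : Int) :
    (l ++ [x]).getLastD d = x := by
  induction l generalizing d with
  | nil => rfl
  | cons a t ih => rw [List.cons_append, List.getLastD_cons]; exact ih a

/-- appending one more anchor appends one more candidate gap. -/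
lemma gapsA_snoc (l : List Int) : ∀ (a x : Int),
    gapsA a (l ++ [x]) = gapsA a l ++ gapOne (l.getLastD a) x := by
  induction l with
  | nil => intro a x; simp [gapsA]
  | cons b r ih =>
    intro a x
    simp only [List.cons_append, gapsA, ih b, List.append_assoc, List.getLastD_cons]

/-- MAIN: the reversed descending gap list of `u` equals A's gaps over any
    strictly-increasing list `s` holding exactly the elements of `u` below `hi`. -/
lemma gapsD_reverse_eq_gapsA (u : List Int) : ∀ (hi : Int) (s : List Int),
    u.Pairwise (fun a b => b ≤ a) →
    (∀ x ∈ u, 0 ≤ x ∧ x ≤ hi) →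
    s.Pairwise (· < ·) →
    (∀ x, x ∈ s ↔ x ∈ u ∧ x < hi) →
    (gapsD hi u).reverse = gapsA (-1) (s ++ [hi]) := by
  induction u with
  | nil =>
    intro hi s _ _ _ hmem
    have hs : s = [] := by
      apply List.eq_nil_iff_forall_not_mem.mpr
      intro x hx
      exact absurd ((hmem x).mp hx).1 (by simp)
    subst hs
    simp only [gapsD, gapsA, gapOne, List.nil_append, List.append_nil]
    split_ifs with h1 h2 <;> first | omega | simp
  | cons v r ih =>
    intro hi s hsort hbound hinc hmem
    have hvle : v ≤ hi := (hbound v (by simp)).2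
    have hrsort : r.Pairwise (fun a b => b ≤ a) := hsort.of_cons
    have hrle : ∀ x ∈ r, x ≤ v := fun x hx => List.rel_of_pairwise_cons hsort hx
    by_cases hv : v < hi
    · -- v is a genuine new seen frame: it is the largest element of s
      have hvs : v ∈ s := (hmem v).mpr ⟨by simp, hv⟩
      have hsmax : ∀ x ∈ s, x ≤ v := by
        intro x hx
        rcases (hmem x).mp hx with ⟨hxu, _⟩
        rcases List.mem_cons.mp hxu with h | h
        · omega
        · exact hrle x h
      -- split s as s' ++ [v]
      obtain ⟨s', hs'⟩ : ∃ s', s = s' ++ [v] := by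
        rcases List.eq_nil_or_concat s with h | ⟨s', y, h⟩
        · exact absurd hvs (by simp [h])
        · rw [List.concat_eq_append] at h
          refine ⟨s', ?_⟩
          have hy : y ∈ s := by simp [h]
          have hylev : y ≤ v := hsmax y hy
          have hvley : v ≤ y := by
            subst h
            rcases List.mem_append.mp hvs with h' | h'
            · have := (List.pairwise_append.mp hinc).2.2 v h' y (by simp)
              omega
            · simp at h'; omega
          have : y = v := le_antisymm hylev hvley
          rw [h, this]
      subst hs'
      have hs'inc : s'.Pairwise (· < ·) := (List.pairwise_append.mp hinc).1
      have hs'lt : ∀ x ∈ s', x < v := fun x hx =>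
        (List.pairwise_append.mp hinc).2.2 x hx v (by simp)
      have hmem' : ∀ x, x ∈ s' ↔ x ∈ r ∧ x < v := by
        intro x
        constructor
        · intro hx
          have hxv := hs'lt x hx
          have hxs : x ∈ s' ++ [v] := List.mem_append.mpr (Or.inl hx)
          rcases (hmem x).mp hxs with ⟨hxu, _⟩
          rcases List.mem_cons.mp hxu with h | h
          · omega
          · exact ⟨h, hxv⟩
        · rintro ⟨hxr, hxv⟩
          have hxs : x ∈ s' ++ [v] := (hmem x).mpr ⟨List.mem_cons.mpr (Or.inr hxr), by omega⟩
          rcases List.mem_append.mp hxs with h | h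
          · exact h
          · simp at h; omega
      have hrbound : ∀ x ∈ r, 0 ≤ x ∧ x ≤ v := by
        intro x hx
        exact ⟨(hbound x (by simp [hx])).1, hrle x hx⟩
      have hrec := ih v s' hrsort hrbound hs'inc hmem'
      have hstep : (gapsD hi (v :: r)).reverse = (gapsD v r).reverse ++ gapOne v hi := by
        simp only [gapsD, if_pos hv, List.reverse_append, gapOne_reverse]
      rw [hstep, hrec, gapsA_snoc (s' ++ [v]) (-1) hi, getLastD_append_singleton]
    · -- v = hi : a duplicate of the anchor, skipped on both sides
      have hvhi : v = hi := by omega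
      have hmem' : ∀ x, x ∈ s ↔ x ∈ r ∧ x < hi := by
        intro x
        rw [hmem x]
        constructor
        · rintro ⟨hxu, hxlt⟩
          rcases List.mem_cons.mp hxu with h | h
          · omega
          · exact ⟨h, hxlt⟩
        · rintro ⟨hxr, hxlt⟩
          exact ⟨List.mem_cons.mpr (Or.inr hxr), hxlt⟩
      have hrbound : ∀ x ∈ r, 0 ≤ x ∧ x ≤ hi := by
        intro x hx
        exact ⟨(hbound x (by simp [hx])).1, by have := hrle x hx; omega⟩
      have := ih hi s hrsort hrbound hinc hmem'
      simpa [gapsD, if_neg hv] using this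

/-- strict sortedness of A's sorted-set list -/
lemma pairwise_lt_sorted_ofList (xs : List Int) :
    (PySem.List.sorted (PySem.Set.ofList xs) (fun x => x) false).Pairwise (· < ·) := by
  have hle := PySem.List.sorted_pairwise (xs := PySem.Set.ofList xs) (key := fun x => x)
  have hnd : (PySem.List.sorted (PySem.Set.ofList xs) (fun x => x) false).Nodup :=
    (PySem.List.sorted_perm (xs := PySem.Set.ofList xs) (key := fun x => x) (rev := false)).nodup_iff.mpr
      (PySem.Set.nodup_ofList xs)
  exact (hle.and hnd).imp (fun h => lt_of_le_of_ne h.1 h.2)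

-- ===== VERDICT (by name: the statement is the Claim_ definition above) =====
theorem unseen_intervals_spec : Claim_equal_unseen_intervals := by
  intro fc sf _
  unfold Spec_unseen_intervals unseen_intervals unseen_intervals_alt
  by_cases hfc : fc ≤ 0
  · simp [hfc]
  · simp only [if_neg hfc]
    set flt := sf.filter (fun i => decide (0 ≤ i) && decide (i < fc)) with hflt
    have hmemflt : ∀ x, x ∈ flt ↔ x ∈ sf ∧ 0 ≤ x ∧ x < fc := by
      intro x; simp [hflt, List.mem_filter]
    -- A side
    set s := PySem.List.sorted (PySem.Set.ofList flt) (fun x => x) false with hs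
    rw [PySem.List.slice_from_one]
    have hA := zipfold_eq_gapsA (s ++ [fc]) (-1) []
    simp only [List.tail_cons] at hA ⊢
    rw [hA, List.nil_append]
    -- B side
    set t := PySem.List.sorted flt (fun x => x) true with ht
    have hB := bfold_eq_gapsD t fc []
    simp only at hB
    rw [hB, List.nil_append]
    -- bridge
    have hmemt : ∀ x, x ∈ t ↔ x ∈ flt := by
      intro x; rw [ht]; exact PySem.List.mem_sorted flt (fun y => y) true x
    have hmems : ∀ x, x ∈ s ↔ x ∈ flt := by
      intro x
      rw [hs, PySem.List.mem_sorted (PySem.Set.ofList flt) (fun y => y) false x]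
      exact PySem.Set.mem_ofList flt x
    rw [gapsD_reverse_eq_gapsA t fc s]
    · rw [ht]; exact (PySem.List.sorted_pairwise_rev flt (fun y => y)).imp (fun h => h)
    · intro x hx
      have := (hmemflt x).mp ((hmemt x).mp hx)
      omega
    · exact pairwise_lt_sorted_ofList flt
    · intro x
      rw [hmems x, hmemt x]
      constructor
      · intro h
        exact ⟨h, ((hmemflt x).mp h).2.2⟩
      · exact fun h => h.1
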